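-- pv_equiv track=rewrite | github.com/dgregor/AdventOfCode | day11/day11.py | shift_galaxies
-- ===== SOURCE A (Python) =====
-- def shift_galaxies(galaxies, blank_rows, blank_columns, multiplier):
--     new_galaxies = []
--     for galaxy in galaxies:
--         shift = len([row for row in blank_rows if row < galaxy[1]])
--         new_galaxies.append((galaxy[0], galaxy[1]+(shift*(multiplier-1))))
--     galaxies = []
--     for galaxy in new_galaxies:
--         shift = len([column for column in blank_columns if column < galaxy[0]])
--         galaxies.append((galaxy[0]+(shift*(multiplier-1)), galaxy[1]))
--     return galaxies
-- ===== SOURCE B (Python) =====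
-- def _count_lt(a, v):
--     # a is sorted ascending; number of elements < v, via binary search
--     lo, hi = 0, len(a)
--     while lo < hi:
--         mid = (lo + hi) // 2
--         if a[mid] < v:
--             lo = mid + 1
--         else:
--             hi = mid
--     return lo
--
--
-- def shift_galaxies(galaxies, blank_rows, blank_columns, multiplier):
--     rows = sorted(blank_rows)
--     cols = sorted(blank_columns)
--     d = multiplier - 1
--     return [(x + _count_lt(cols, x) * d, y + _count_lt(rows, y) * d)
--             for x, y in galaxies]
-- ===== Notes on version B (the rewrite author's own statement) =====
-- stated objective: faster
-- what changed: B sorts the blank row/column lists once and counts 'elements < coordinate' per galaxy with a hand-written binary search, instead of A's per-galaxy filter-and-rescan over the whole blank lists in two separate append loops.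
import Mathlib
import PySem

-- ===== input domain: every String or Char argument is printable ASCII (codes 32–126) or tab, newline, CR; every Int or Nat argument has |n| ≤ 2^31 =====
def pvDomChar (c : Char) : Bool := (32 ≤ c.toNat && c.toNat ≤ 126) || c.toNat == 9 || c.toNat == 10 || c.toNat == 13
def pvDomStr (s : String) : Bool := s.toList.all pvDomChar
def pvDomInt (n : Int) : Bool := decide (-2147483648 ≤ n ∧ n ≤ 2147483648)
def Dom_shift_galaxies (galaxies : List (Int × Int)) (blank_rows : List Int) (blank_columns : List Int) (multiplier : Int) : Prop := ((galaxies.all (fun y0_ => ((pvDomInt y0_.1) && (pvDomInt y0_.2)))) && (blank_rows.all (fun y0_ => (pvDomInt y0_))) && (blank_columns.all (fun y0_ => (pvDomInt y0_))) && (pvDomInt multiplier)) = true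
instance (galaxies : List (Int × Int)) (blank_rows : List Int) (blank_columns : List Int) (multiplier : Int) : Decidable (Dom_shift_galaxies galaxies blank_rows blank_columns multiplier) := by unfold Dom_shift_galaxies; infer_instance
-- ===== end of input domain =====

-- B replaces A's per-galaxy rescan of the blank lists by sorting them once and
-- counting with a hand-written binary search (objective: faster, O((n+m) log m) vs O(n*m)).

-- ===== PORT A =====
-- literal transliteration: two loops, each appending to an accumulator list;
-- the per-galaxy shift is the length of a filtered copy of the blank list
def shift_galaxies (galaxies : List (Int × Int)) (blank_rows : List Int) (blank_columns : List Int) (multiplier : Int) : List (Int × Int) :=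
  let new_galaxies := galaxies.foldl (fun acc galaxy =>
    acc ++ [(galaxy.1, galaxy.2 + ((blank_rows.filter (fun row => decide (row < galaxy.2))).length : Int) * (multiplier - 1))]) []
  new_galaxies.foldl (fun acc galaxy =>
    acc ++ [(galaxy.1 + ((blank_columns.filter (fun column => decide (column < galaxy.1))).length : Int) * (multiplier - 1), galaxy.2)]) []

-- ===== PORT B =====
-- Source B's hand-written binary-search loop `_count_lt` (a[mid] is always in range, so getD's default is never used)
def countLtGo (a : List Int) (v : Int) (lo hi : Nat) : Nat :=
  if lo < hi then
    let mid := (lo + hi) / 2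
    if a.getD mid 0 < v then countLtGo a v (mid + 1) hi else countLtGo a v lo mid
  else lo
termination_by hi - lo
decreasing_by all_goals omega

def count_lt (a : List Int) (v : Int) : Nat := countLtGo a v 0 a.length

def shift_galaxies_alt (galaxies : List (Int × Int)) (blank_rows : List Int) (blank_columns : List Int) (multiplier : Int) : List (Int × Int) :=
  let rows := PySem.List.sorted blank_rows (fun x => x) false
  let cols := PySem.List.sorted blank_columns (fun x => x) false
  let d := multiplier - 1
  galaxies.map (fun p => (p.1 + (count_lt cols p.1 : Int) * d, p.2 + (count_lt rows p.2 : Int) * d))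

-- ===== PRECONDITION & SPEC =====
def Spec_shift_galaxies (galaxies : List (Int × Int)) (blank_rows : List Int) (blank_columns : List Int) (multiplier : Int) (out : List (Int × Int)) : Prop := out = shift_galaxies_alt galaxies blank_rows blank_columns multiplier
instance (galaxies : List (Int × Int)) (blank_rows : List Int) (blank_columns : List Int) (multiplier : Int) (out : List (Int × Int)) : Decidable (Spec_shift_galaxies galaxies blank_rows blank_columns multiplier out) := by unfold Spec_shift_galaxies; infer_instance

-- ===== CLAIM (what is proved, stated in full; the proofs are below) =====
def Claim_equal_shift_galaxies : Prop := ∀ (galaxies : List (Int × Int)) (blank_rows : List Int) (blank_columns : List Int) (multiplier : Int), Dom_shift_galaxies galaxies blank_rows blank_columns multiplier → Spec_shift_galaxies galaxies blank_rows blank_columns multiplier (shift_galaxies galaxies blank_rows blank_columns multiplier)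

-- ===== LEMMAS AND PROOFS =====

-- A's append-loops are maps
theorem foldl_append_singleton {α β : Type} (f : α → β) :
    ∀ (l : List α) (acc : List β), l.foldl (fun a x => a ++ [f x]) acc = acc ++ l.map f := by
  intro l
  induction l with
  | nil => simp
  | cons x t ih => intro acc; simp [List.foldl, ih]

-- in a sorted list, index i holds an element < v iff i is below the count of elements < v
theorem sorted_index_lt (v : Int) :
    ∀ (l : List Int), l.Pairwise (· ≤ ·) →
      ∀ i (h : i < l.length), (l[i] < v ↔ i < l.countP (fun x => decide (x < v))) := by
  intro l
  induction l with
  | nil => intro _ i h; simp at h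
  | cons a t ih =>
    intro hp i h
    have hpt := (List.pairwise_cons.mp hp).2
    have hat := (List.pairwise_cons.mp hp).1
    by_cases hav : a < v
    · have hc : (a :: t).countP (fun x => decide (x < v)) = t.countP (fun x => decide (x < v)) + 1 := by
        simp [hav]
      cases i with
      | zero => simpa [hc] using hav
      | succ j =>
        have hj : j < t.length := by simpa using h
        have := ih hpt j hj
        simpa [hc, Nat.succ_lt_succ_iff] using this
    · have hnone : ∀ x ∈ a :: t, ¬ x < v := by
        intro x hx
        rcases List.mem_cons.mp hx with rfl | hxt
        · exact hav
        · exact fun hlt => hav (lt_of_le_of_lt (hat x hxt) hlt)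
      have hc : (a :: t).countP (fun x => decide (x < v)) = 0 := by
        rw [List.countP_eq_zero]
        intro x hx
        simpa using hnone x hx
      rw [hc]
      simp only [Nat.not_lt_zero, iff_false]
      exact hnone _ (List.mem_of_getElem rfl)

theorem countLtGo_eq (l : List Int) (v : Int) (hs : l.Pairwise (· ≤ ·)) :
    ∀ lo hi, hi ≤ l.length → lo ≤ l.countP (fun x => decide (x < v)) →
      l.countP (fun x => decide (x < v)) ≤ hi →
      countLtGo l v lo hi = l.countP (fun x => decide (x < v)) := by
  intro lo hi
  generalize hk : hi - lo = k
  induction k using Nat.strong_induction_on generalizing lo hi with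
  | _ k ih =>
    intro hhi hlo hc
    unfold countLtGo
    by_cases hlt : lo < hi
    · simp only [hlt, if_true]
      have hmid : (lo + hi) / 2 < l.length := by omega
      have hget : l.getD ((lo + hi) / 2) 0 = l[(lo + hi) / 2] := List.getD_eq_getElem l 0 hmid
      by_cases hg : l.getD ((lo + hi) / 2) 0 < v
      · simp only [hg, if_true]
        have h1 : (lo + hi) / 2 < l.countP (fun x => decide (x < v)) :=
          (sorted_index_lt v l hs _ hmid).mp (hget ▸ hg)
        exact ih (hi - ((lo + hi) / 2 + 1)) (by omega) _ _ rfl hhi (by omega) hc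
      · simp only [hg, if_false]
        have h2 : l.countP (fun x => decide (x < v)) ≤ (lo + hi) / 2 := by
          by_contra hcon
          exact hg (hget ▸ ((sorted_index_lt v l hs _ hmid).mpr (by omega)))
        exact ih ((lo + hi) / 2 - lo) (by omega) _ _ rfl (by omega) hlo h2
    · simp only [hlt, if_false]
      omega

theorem count_lt_sorted (l : List Int) (v : Int) :
    count_lt (PySem.List.sorted l (fun x => x) false) v = l.countP (fun x => decide (x < v)) := by
  have hs : (PySem.List.sorted l (fun x => x) false).Pairwise (· ≤ ·) :=
    PySem.List.sorted_pairwise l (fun x => x)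
  have hperm := PySem.List.sorted_perm l (fun x => x) false
  rw [count_lt, countLtGo_eq _ v hs 0 _ le_rfl (Nat.zero_le _) List.countP_le_length]
  exact hperm.countP_eq _

-- ===== VERDICT (by name: the statement is the Claim_ definition above) =====
theorem shift_galaxies_spec : Claim_equal_shift_galaxies := by
  intro galaxies blank_rows blank_columns multiplier _
  unfold Spec_shift_galaxies shift_galaxies shift_galaxies_alt
  rw [foldl_append_singleton, foldl_append_singleton]
  simp only [List.nil_append, List.map_map, List.map_inj_left]
  intro p _
  simp only [Function.comp_apply, count_lt_sorted, List.countP_eq_length_filter]
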